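-- pv_equiv track=rewrite | github.com/github-roushan/LeetCodePractice | Python/problems/3638.py | maxBalancedShipments
-- ===== SOURCE A (Python) =====
-- from typing import List
-- from math import inf
--
-- def maxBalancedShipments(weights: List[int]) -> int:
--     max_balanced = 0
--     previous_balanced = -1
--     next_weight = inf
--
--     for current_weight in reversed(weights):
--         current_max = max_balanced
--
--         # Check if current_weight can displace the previous next_weight
--         if current_weight > next_weight:
--             current_max = max(current_max, previous_balanced + 1)
--
--         # Update tracking variables for next iteration
--         next_weight = current_weight
--         max_balanced, previous_balanced = current_max, max_balanced
--
--     return max_balanced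
-- ===== SOURCE B (Python) =====
-- from typing import List
--
-- def maxBalancedShipments(weights: List[int]) -> int:
--     # Forward greedy: track the running maximum of the current segment;
--     # a weight strictly below it closes one balanced shipment.
--     count = 0
--     mx = None
--     for w in weights:
--         if mx is not None and w < mx:
--             count += 1
--             mx = None
--         else:
--             mx = w
--     return count
-- ===== Notes on version B (the rewrite author's own statement) =====
-- stated objective: simpler
-- what changed: Replaced A's reverse-order DP carrying (max_balanced, previous_balanced, next_weight) by a single forward greedy pass that tracks one running segment maximum and counts resets.
import Mathlib
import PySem

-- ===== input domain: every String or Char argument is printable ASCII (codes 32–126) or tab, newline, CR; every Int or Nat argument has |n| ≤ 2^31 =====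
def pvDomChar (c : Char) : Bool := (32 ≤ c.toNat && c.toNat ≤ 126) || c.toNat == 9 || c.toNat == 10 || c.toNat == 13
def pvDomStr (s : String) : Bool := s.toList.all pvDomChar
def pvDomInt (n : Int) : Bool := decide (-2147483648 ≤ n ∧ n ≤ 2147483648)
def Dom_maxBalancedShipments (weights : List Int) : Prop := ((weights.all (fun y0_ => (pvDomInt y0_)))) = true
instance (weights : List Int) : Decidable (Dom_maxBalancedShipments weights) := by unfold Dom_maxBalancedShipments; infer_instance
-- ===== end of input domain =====

-- B replaces A's reverse-order DP by a forward greedy pass tracking one running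
-- segment maximum (objective: simpler).

-- ===== PORT A =====
-- A's `next_weight` starts as math.inf and is thereafter always an int; it is
-- ported as `Option Int` with `none` = +inf (so `w > none` is false), exact here
-- because inf only ever appears as the right operand of `>`.
def stepA (s : Int × Int × Option Int) (w : Int) : Int × Int × Option Int :=
  let mb := s.1
  let pb := s.2.1
  let cm := match s.2.2 with
    | none => mb
    | some nw => if w > nw then max mb (pb + 1) else mb
  (cm, mb, some w)

def maxBalancedShipments (weights : List Int) : Int :=
  (weights.reverse.foldl stepA (0, -1, none)).1

-- ===== PORT B =====
-- B's sentinel `mx = None` is `none`.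
def stepB (s : Option Int × Int) (w : Int) : Option Int × Int :=
  match s.1 with
  | some m => if w < m then (none, s.2 + 1) else (some w, s.2)
  | none => (some w, s.2)

def maxBalancedShipments_alt (weights : List Int) : Int :=
  (weights.foldl stepB (none, 0)).2

-- ===== PRECONDITION & SPEC =====
def Spec_maxBalancedShipments (weights : List Int) (out : Int) : Prop := out = maxBalancedShipments_alt weights
instance (weights : List Int) (out : Int) : Decidable (Spec_maxBalancedShipments weights out) := by unfold Spec_maxBalancedShipments; infer_instance

-- ===== CLAIM (what is proved, stated in full; the proofs are below) =====
def Claim_equal_maxBalancedShipments : Prop := ∀ (weights : List Int), Dom_maxBalancedShipments weights → Spec_maxBalancedShipments weights (maxBalancedShipments weights)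


-- ===== LEMMAS AND PROOFS =====

-- Peeling the front element of A's reversed fold.
theorem stA_cons (w : Int) (ws : List Int) :
    (w :: ws).reverse.foldl stepA (0, -1, none) =
      stepA (ws.reverse.foldl stepA (0, -1, none)) w := by
  simp [List.reverse_cons, List.foldl_append]

-- Full state after A has processed w :: ws.
theorem stA_state (w : Int) (ws : List Int) :
    (w :: ws).reverse.foldl stepA (0, -1, none) =
      (maxBalancedShipments (w :: ws), maxBalancedShipments ws, some w) := by
  rw [stA_cons]
  simp [maxBalancedShipments, stepA]

theorem ansA_single (w : Int) : maxBalancedShipments [w] = 0 := by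
  simp [maxBalancedShipments, stepA]

theorem ansA_cons2 (w w2 : Int) (ws : List Int) :
    maxBalancedShipments (w :: w2 :: ws) =
      if w > w2 then max (maxBalancedShipments (w2 :: ws)) (maxBalancedShipments ws + 1)
      else maxBalancedShipments (w2 :: ws) := by
  show ((w :: w2 :: ws).reverse.foldl stepA (0, -1, none)).1 = _
  rw [stA_cons, stA_state]
  by_cases h : w > w2 <;> simp [stepA, h]

-- Dropping the first element never increases A's answer.
theorem ansA_mono (w : Int) (ws : List Int) :
    maxBalancedShipments ws ≤ maxBalancedShipments (w :: ws) := by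
  cases ws with
  | nil => simp [ansA_single]; rfl
  | cons w2 ws' =>
    rw [ansA_cons2]
    split
    · exact le_max_left _ _
    · exact le_refl _

-- Adding one element in front increases A's answer by at most one.
theorem ansA_step (w : Int) (ws : List Int) :
    maxBalancedShipments (w :: ws) ≤ maxBalancedShipments ws + 1 := by
  cases ws with
  | nil =>
    have h0 : maxBalancedShipments [] = 0 := rfl
    simp [ansA_single, h0]
  | cons w2 ws' =>
    rw [ansA_cons2]
    split
    · exact max_le (by omega) (by have := ansA_mono w2 ws'; omega)
    · omega

-- The counter threads additively through B's fold.
theorem stepB_shift (s : List Int) : ∀ (m : Option Int) (c : Int),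
    (s.foldl stepB (m, c)).2 = c + (s.foldl stepB (m, 0)).2 := by
  induction s with
  | nil => intro m c; simp
  | cons w ws ih =>
    intro m c
    cases m with
    | none =>
      simp only [List.foldl_cons, stepB]
      rw [ih (some w) c]
    | some v =>
      by_cases h : w < v
      · simp only [List.foldl_cons, stepB, if_pos h]
        rw [ih none (c + 1), ih none (0 + 1)]
        omega
      · simp only [List.foldl_cons, stepB, if_neg h]
        rw [ih (some w) c]

-- Core invariant: B's fold started with running max `some w` on s computes
-- A's answer on w :: s; started fresh it computes A's answer on s.
theorem B_invariant (s : List Int) :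
    (∀ w : Int, (s.foldl stepB (some w, 0)).2 = maxBalancedShipments (w :: s)) ∧
      (s.foldl stepB ((none : Option Int), 0)).2 = maxBalancedShipments s := by
  induction s with
  | nil => exact ⟨fun w => (ansA_single w).symm, rfl⟩
  | cons w2 ws ih =>
    have key : ∀ w : Int, ((w2 :: ws).foldl stepB (some w, 0)).2 =
        maxBalancedShipments (w :: w2 :: ws) := by
      intro w
      by_cases h : w2 < w
      · simp only [List.foldl_cons, stepB, if_pos h]
        rw [stepB_shift ws none (0 + 1), ih.2, ansA_cons2]
        have h1 := ansA_step w2 ws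
        rw [if_pos h, max_eq_right h1]
        omega
      · simp only [List.foldl_cons, stepB, if_neg h]
        rw [ansA_cons2, if_neg h]
        exact ih.1 w2
    refine ⟨key, ?_⟩
    simp only [List.foldl_cons, stepB]
    exact ih.1 w2

-- ===== VERDICT (by name: the statement is the Claim_ definition above) =====
theorem maxBalancedShipments_spec : Claim_equal_maxBalancedShipments := by
  intro weights _
  unfold Spec_maxBalancedShipments maxBalancedShipments_alt
  exact ((B_invariant weights).2).symm
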